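-- pv_equiv track=rewrite | github.com/biolab/orange3 | Orange/widgets/data/owcreateclass.py | unique_in_order_mapping
-- ===== SOURCE A (Python) =====
-- from typing import Optional, Sequence
--
-- def unique_in_order_mapping(a: Sequence[str]) -> tuple[list[str], list[int]]:
--     """ Return
--     - unique elements of the input list (in the order of appearance)
--     - indices of the input list onto the returned uniques
--     """
--     first_position = {}
--     unique_in_order = []
--     mapping = []
--     for e in a:
--         if e not in first_position:
--             first_position[e] = len(unique_in_order)
--             unique_in_order.append(e)
--         mapping.append(first_position[e])
--     return unique_in_order, mapping
-- ===== SOURCE B (Python) =====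
-- def unique_in_order_mapping(a):
--     """ Return
--     - unique elements of the input list (in the order of appearance)
--     - indices of the input list onto the returned uniques
--     """
--     unique = [e for i, e in enumerate(a) if a.index(e) == i]
--     mapping = [unique.index(e) for e in a]
--     return unique, mapping
-- ===== Notes on version B (the rewrite author's own statement) =====
-- stated objective: alternative
-- what changed: A maintains a growing first-position dict in one fused loop; B uses no dict at all: it keeps an element iff list.index finds it at its own position (first occurrences) and then maps each element by list.index into the finished unique list, trading A's hash table for quadratic positional scans.
import Mathlib
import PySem

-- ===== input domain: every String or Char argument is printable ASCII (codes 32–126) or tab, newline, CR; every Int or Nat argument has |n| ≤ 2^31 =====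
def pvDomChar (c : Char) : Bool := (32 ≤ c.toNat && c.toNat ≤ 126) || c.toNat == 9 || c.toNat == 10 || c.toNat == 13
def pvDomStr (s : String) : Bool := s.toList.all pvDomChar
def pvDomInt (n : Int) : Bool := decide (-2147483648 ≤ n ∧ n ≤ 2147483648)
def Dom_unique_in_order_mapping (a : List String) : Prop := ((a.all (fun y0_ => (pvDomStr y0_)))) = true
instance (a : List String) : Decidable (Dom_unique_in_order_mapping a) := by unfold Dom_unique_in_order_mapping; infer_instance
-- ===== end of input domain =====

-- B drops A's hash table entirely: it keeps an element iff list.index finds it at its own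
-- position, then maps each element by list.index into the finished unique list
-- (objective: alternative — quadratic positional scans instead of A's dict).

-- ===== PORT A =====
-- A's loop: state (first_position, unique_in_order, mapping); `first_position[e]` after the
-- insert is `getD e 0` — the key is always present at that lookup, so getD is exact.
def uiomLoop : List String → PySem.Dict String Int → List String → List Int → List String × List Int
  | [], _, unique, mapping => (unique, mapping)
  | e :: rest, fp, unique, mapping =>
    if fp.contains e then
      uiomLoop rest fp unique (mapping ++ [fp.getD e 0])
    else
      uiomLoop rest (fp.insert e (unique.length : Int)) (unique ++ [e])
        (mapping ++ [(fp.insert e (unique.length : Int)).getD e 0])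

def unique_in_order_mapping (a : List String) : List String × List Int :=
  uiomLoop a PySem.Dict.empty [] []

-- ===== PORT B =====
-- `unique.index(e)` in B's second comprehension never raises (every e of a is in unique),
-- so `.getD 0` on the Option is exact there.
def unique_in_order_mapping_alt (a : List String) : List String × List Int :=
  let unique := ((PySem.List.enumerate a 0).filter
      (fun p => (PySem.List.index? a p.2).map (fun k => Int.ofNat k) == some p.1)).map (·.2)
  let mapping := a.map (fun e => ((PySem.List.index? unique e).map (fun k => Int.ofNat k)).getD 0)
  (unique, mapping)

-- ===== PRECONDITION & SPEC =====
def Spec_unique_in_order_mapping (a : List String) (out : List String × List Int) : Prop := out = unique_in_order_mapping_alt a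
instance (a : List String) (out : List String × List Int) : Decidable (Spec_unique_in_order_mapping a out) := by unfold Spec_unique_in_order_mapping; infer_instance

-- ===== CLAIM (what is proved, stated in full; the proofs are below) =====
def Claim_equal_unique_in_order_mapping : Prop := ∀ (a : List String), Dom_unique_in_order_mapping a → Spec_unique_in_order_mapping a (unique_in_order_mapping a)

-- ===== LEMMAS AND PROOFS =====

-- list.index of a present element is its first-occurrence position.
lemma index?_of_mem (u : List String) (e : String) (he : e ∈ u) :
    PySem.List.index? u e = some (u.idxOf e) := by
  induction u with
  | nil => simp at he
  | cons x t ih =>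
      by_cases hex : e = x
      · subst hex
        rw [PySem.List.index?_cons_self, List.idxOf_cons_self]
      · have het : e ∈ t := by
          rcases List.mem_cons.mp he with h | h
          · exact absurd h hex
          · exact h
        rw [PySem.List.index?_cons_of_ne _ (fun h => hex h.symm), ih het,
          List.idxOf_cons_ne _ (fun h => hex h.symm)]
        rfl

-- First-occurrence index is stable under extending the list on the right.
lemma idxOf_update (u r : List String) (e : String) (he : e ∈ u) :
    (PySem.Set.update u r).idxOf e = u.idxOf e := by
  rw [PySem.Set.update_eq_append_filter]
  exact List.idxOf_append_of_mem he

-- Invariant of A's fused loop, stated against the final dedup and first-occurrence indices.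
lemma uiomLoop_eq (rest : List String) (fp : PySem.Dict String Int) (u : List String)
    (m : List Int)
    (hc : ∀ e, fp.contains e = decide (e ∈ u))
    (hg : ∀ e ∈ u, fp.getD e 0 = (u.idxOf e : Int))
    (hnd : u.Nodup) :
    uiomLoop rest fp u m =
      (PySem.Set.update u rest,
       m ++ rest.map (fun e => ((PySem.Set.update u rest).idxOf e : Int))) := by
  induction rest generalizing fp u m with
  | nil => simp [uiomLoop, PySem.Set.update_nil]
  | cons e r ih =>
      rw [uiomLoop, hc e]
      by_cases hmem : e ∈ u
      · rw [if_pos (by simp [hmem])]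
        rw [ih fp u _ hc hg hnd]
        rw [PySem.Set.update_cons, PySem.Set.add_of_mem hmem]
        simp only [List.map_cons, List.append_assoc, List.singleton_append]
        rw [hg e hmem, idxOf_update u r e hmem]
      · rw [if_neg (by simp [hmem])]
        have hidx : (u ++ [e]).idxOf e = u.length := by
          rw [List.idxOf_append_of_notMem hmem, List.idxOf_cons_self]
          omega
        have hc' : ∀ x, (fp.insert e (u.length : Int)).contains x = decide (x ∈ u ++ [e]) := by
          intro x
          rw [PySem.Dict.contains_insert, hc x]
          by_cases hx : x = e <;> simp [hx]
        have hg' : ∀ x ∈ u ++ [e],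
            (fp.insert e (u.length : Int)).getD x 0 = ((u ++ [e]).idxOf x : Int) := by
          intro x hx
          by_cases hxe : x = e
          · subst hxe
            rw [PySem.Dict.getD_insert_self, hidx]
          · have hxu : x ∈ u := by
              rcases List.mem_append.mp hx with h | h
              · exact h
              · exact absurd (List.mem_singleton.mp h) hxe
            rw [PySem.Dict.getD_insert_of_ne _ _ _ hxe, hg x hxu,
              List.idxOf_append_of_mem hxu]
        have hnd' : (u ++ [e]).Nodup := by
          refine List.Nodup.append hnd (List.nodup_singleton e) ?_
          intro a ha hb
          exact hmem ((List.mem_singleton.mp hb) ▸ ha)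
        rw [ih _ (u ++ [e]) _ hc' hg' hnd']
        rw [PySem.Set.update_cons, PySem.Set.add_of_not_mem hmem]
        simp only [List.map_cons, List.append_assoc, List.singleton_append]
        rw [PySem.Dict.getD_insert_self,
          idxOf_update (u ++ [e]) r e (by simp), hidx]

-- B's first comprehension, run over the suffix t of a at offset pre.length, appends to the
-- already-collected uniques of pre exactly the new first occurrences: together Set.update.
lemma filter_firstocc (a : List String) : ∀ (t pre : List String), a = pre ++ t →
    PySem.Set.ofList pre ++ ((PySem.List.enumerate t (pre.length : Int)).filter
        (fun p => (PySem.List.index? a p.2).map (fun k => Int.ofNat k) == some p.1)).map (·.2)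
      = PySem.Set.update (PySem.Set.ofList pre) t := by
  intro t
  induction t with
  | nil => intro pre _; simp [PySem.List.enumerate_nil, PySem.Set.update_nil]
  | cons x r ih =>
      intro pre ha
      rw [PySem.List.enumerate_cons]
      simp only [List.filter_cons]
      have hofl : PySem.Set.ofList (pre ++ [x]) = PySem.Set.add (PySem.Set.ofList pre) x := by
        rw [PySem.Set.ofList_append, PySem.Set.update_cons, PySem.Set.update_nil]
      have hlen : ((pre ++ [x]).length : Int) = (pre.length : Int) + 1 := by
        simp
      by_cases hx : x ∈ pre
      · have hcond : ((PySem.List.index? a x).map (fun k => Int.ofNat k) == some (pre.length : Int)) = false := by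
          rw [ha, PySem.List.index?_append_of_mem _ hx, index?_of_mem pre x hx]
          have hlt : pre.idxOf x < pre.length := List.idxOf_lt_length_of_mem hx
          simp only [Option.map_some, beq_eq_false_iff_ne, ne_eq, Option.some.injEq,
            Int.ofNat_eq_natCast]
          intro h
          omega
        rw [hcond]
        simp only [Bool.false_eq_true, if_false]
        have := ih (pre ++ [x]) (by rw [ha]; simp)
        rw [hofl, PySem.Set.add_of_mem ((PySem.Set.mem_ofList pre x).mpr hx), hlen] at this
        rw [this, PySem.Set.update_cons,
          PySem.Set.add_of_mem ((PySem.Set.mem_ofList pre x).mpr hx)]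
      · have hcond : ((PySem.List.index? a x).map (fun k => Int.ofNat k) == some (pre.length : Int)) = true := by
          have hsome : PySem.List.index? a x = some pre.length := by
            rw [ha]
            exact (PySem.List.index?_eq_some_iff _ x pre.length).mpr ⟨pre, r, rfl, rfl, hx⟩
          rw [hsome]
          simp
        rw [hcond]
        simp only [if_true, List.map_cons]
        have hxo : x ∉ PySem.Set.ofList pre := fun h => hx ((PySem.Set.mem_ofList pre x).mp h)
        have := ih (pre ++ [x]) (by rw [ha]; simp)
        rw [hofl, PySem.Set.add_of_not_mem hxo, hlen] at this
        rw [PySem.Set.update_cons, PySem.Set.add_of_not_mem hxo, ← this]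
        simp

-- ===== VERDICT (by name: the statement is the Claim_ definition above) =====
theorem unique_in_order_mapping_spec : Claim_equal_unique_in_order_mapping := by
  intro a _
  show unique_in_order_mapping a = unique_in_order_mapping_alt a
  rw [unique_in_order_mapping,
    uiomLoop_eq a PySem.Dict.empty [] []
      (by intro e; simp [PySem.Dict.contains_empty])
      (by intro e he; simp at he)
      List.nodup_nil]
  rw [unique_in_order_mapping_alt]
  have hu : ((PySem.List.enumerate a 0).filter
      (fun p => (PySem.List.index? a p.2).map (fun k => Int.ofNat k) == some p.1)).map (·.2)
      = PySem.List.dedup a := by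
    have := filter_firstocc a a [] rfl
    simpa [PySem.Set.update_nil_left, PySem.List.dedup_eq_ofList] using this
  have hu' : PySem.Set.update [] a = PySem.List.dedup a := by
    rw [PySem.Set.update_nil_left, PySem.List.dedup_eq_ofList]
  simp only [hu, hu', List.nil_append]
  refine Prod.ext rfl ?_
  apply List.map_congr_left
  intro e he
  rw [index?_of_mem (PySem.List.dedup a) e ((PySem.List.mem_dedup a e).mpr he)]
  simp
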